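-- pv_equiv track=rewrite | github.com/chadvoegele/suppa | suplistml/src/suplistml/data/nyt.py | _split_imperial_metric
-- ===== SOURCE A (Python) =====
-- def _split_imperial_metric(s):
--     """
--     We sometimes give American units and metric units for baking recipes. For example:
--         * 2 tablespoons/30 mililiters milk or cream
--         * 2 1/2 cups/300 grams all-purpose flour
--
--     The recipe database only allows for one unit, and we want to use the American one.
--     But we must split the text on "cups/" etc. in order to pick it up.
--     """
--     american_units = [
--         "cup",
--         "tablespoon",
--         "teaspoon",
--         "pound",
--         "ounce",
--         "quart",
--         "pint",
--     ]
--     for unit in american_units: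
--         s = s.replace(unit + "/", unit + " / ")
--         s = s.replace(unit + "s/", unit + "s / ")
--
--     return s
-- ===== SOURCE B (Python) =====
-- def _split_imperial_metric(s):
--     # One left-to-right pass over the string with a pattern table,
--     # instead of 14 sequential full-string replace passes.
--     units = [
--         "cup",
--         "tablespoon",
--         "teaspoon",
--         "pound",
--         "ounce",
--         "quart",
--         "pint",
--     ]
--     pats = [u + suf for u in units for suf in ("/", "s/")]
--     out = []
--     i = 0
--     n = len(s)
--     while i < n:
--         for p in pats:
--             if s.startswith(p, i):
--                 out.append(p[:-1] + " / ")
--                 i += len(p)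
--                 break
--         else:
--             out.append(s[i])
--             i += 1
--     return "".join(out)
-- ===== Notes on version B (the rewrite author's own statement) =====
-- stated objective: alternative
-- what changed: Replaces A's 14 sequential full-string str.replace passes (one per unit pattern) with a single left-to-right scan that consults a table of the 14 patterns at each position and emits the split replacement in place.
import Mathlib
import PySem

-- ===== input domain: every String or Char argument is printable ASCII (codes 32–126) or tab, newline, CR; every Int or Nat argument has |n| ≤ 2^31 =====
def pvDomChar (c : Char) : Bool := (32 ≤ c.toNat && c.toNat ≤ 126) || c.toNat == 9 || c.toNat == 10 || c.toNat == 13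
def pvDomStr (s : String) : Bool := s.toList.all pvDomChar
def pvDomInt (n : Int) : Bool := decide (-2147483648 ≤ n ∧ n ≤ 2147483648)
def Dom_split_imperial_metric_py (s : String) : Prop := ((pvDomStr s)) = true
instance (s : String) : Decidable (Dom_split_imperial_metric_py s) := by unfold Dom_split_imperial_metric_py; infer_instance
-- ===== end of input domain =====

-- B replaces A's 14 sequential full-string str.replace passes by one left-to-right scan
-- that consults a table of the 14 "unit(s)/" patterns at each position (objective: alternative).

-- ===== PORT A =====
-- literal port of A: for each unit, two full-string replaces, applied in sequence
def split_imperial_metric_py (s : String) : String :=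
  let american_units : List String := ["cup", "tablespoon", "teaspoon", "pound", "ounce", "quart", "pint"]
  american_units.foldl (fun s unit =>
    let s := PySem.Str.replace s (unit ++ "/") (unit ++ " / ")
    let s := PySem.Str.replace s (unit ++ "s/") (unit ++ "s / ")
    s) s

-- ===== PORT B =====
-- pats = [u + suf for u in units for suf in ("/", "s/")]
def pvPats : List (List Char) :=
  (["cup", "tablespoon", "teaspoon", "pound", "ounce", "quart", "pint"] : List String).flatMap
    (fun u => [(u ++ "/").toList, (u ++ "s/").toList])

-- the single left-to-right pass of Source B: at each position try the pattern table;
-- on a match emit p[:-1] + " / " and skip len(p) chars, else copy one char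
def pvScan (pats : List (List Char)) : List Char → List Char
  | [] => []
  | c :: t =>
    match pats.find? (fun p => p.isPrefixOf (c :: t)) with
    | some p => p.dropLast ++ ' ' :: '/' :: ' ' :: pvScan pats (t.drop (p.length - 1))
    | none => c :: pvScan pats t
termination_by cs => cs.length
decreasing_by
  · simp only [List.length_drop, List.length_cons]; omega
  · simp only [List.length_cons]; omega

def split_imperial_metric_py_alt (s : String) : String :=
  String.ofList (pvScan pvPats s.toList)

-- ===== PRECONDITION & SPEC =====
def Spec_split_imperial_metric_py (s : String) (out : String) : Prop := out = split_imperial_metric_py_alt s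
instance (s : String) (out : String) : Decidable (Spec_split_imperial_metric_py s out) := by unfold Spec_split_imperial_metric_py; infer_instance

-- ===== CLAIM (what is proved, stated in full; the proofs are below) =====
def Claim_equal_split_imperial_metric_py : Prop := ∀ (s : String), Dom_split_imperial_metric_py s → Spec_split_imperial_metric_py s (split_imperial_metric_py s)

-- ===== LEMMAS AND PROOFS =====

-- proof-side model of one str.replace pass (leftmost, non-overlapping)
def pvRepl (old new : List Char) : List Char → List Char
  | [] => []
  | c :: t =>
    if old.isPrefixOf (c :: t) then new ++ pvRepl old new (t.drop (old.length - 1))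
    else c :: pvRepl old new t
termination_by l => l.length
decreasing_by
  · simp only [List.length_drop, List.length_cons]; omega
  · simp only [List.length_cons]; omega

-- proof-side single pass, keyed by the stems (pattern minus the trailing '/')
def pvGo (stems : List (List Char)) : List Char → List Char
  | [] => []
  | c :: t =>
    match stems.find? (fun v => (v ++ ['/']).isPrefixOf (c :: t)) with
    | some v => v ++ ' ' :: '/' :: ' ' :: pvGo stems (t.drop v.length)
    | none => c :: pvGo stems t
termination_by cs => cs.length
decreasing_by
  · simp only [List.length_drop, List.length_cons]; omega
  · simp only [List.length_cons]; omega

def pvStep (l : List Char) (w : List Char) : List Char :=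
  pvRepl (w ++ ['/']) (w ++ [' ', '/', ' ']) l

def pvStems : List (List Char) :=
  [['c','u','p'], ['c','u','p','s'],
   ['t','a','b','l','e','s','p','o','o','n'], ['t','a','b','l','e','s','p','o','o','n','s'],
   ['t','e','a','s','p','o','o','n'], ['t','e','a','s','p','o','o','n','s'],
   ['p','o','u','n','d'], ['p','o','u','n','d','s'],
   ['o','u','n','c','e'], ['o','u','n','c','e','s'],
   ['q','u','a','r','t'], ['q','u','a','r','t','s'],
   ['p','i','n','t'], ['p','i','n','t','s']]

-- equation lemmas
theorem pvRepl_nil (old new : List Char) : pvRepl old new [] = [] := by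
  rw [pvRepl]

theorem pvRepl_pos (old new : List Char) (c : Char) (t : List Char)
    (h : old.isPrefixOf (c :: t) = true) :
    pvRepl old new (c :: t) = new ++ pvRepl old new (t.drop (old.length - 1)) := by
  rw [pvRepl]; simp [h]

theorem pvRepl_neg (old new : List Char) (c : Char) (t : List Char)
    (h : ¬ old.isPrefixOf (c :: t) = true) :
    pvRepl old new (c :: t) = c :: pvRepl old new t := by
  rw [pvRepl]; simp [h]

theorem pvGo_nil (stems : List (List Char)) : pvGo stems [] = [] := by
  rw [pvGo]

theorem pvGo_cons_some (stems : List (List Char)) (c : Char) (t v : List Char)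
    (h : stems.find? (fun v => (v ++ ['/']).isPrefixOf (c :: t)) = some v) :
    pvGo stems (c :: t) = v ++ ' ' :: '/' :: ' ' :: pvGo stems (t.drop v.length) := by
  rw [pvGo, h]

theorem pvGo_cons_none (stems : List (List Char)) (c : Char) (t : List Char)
    (h : stems.find? (fun v => (v ++ ['/']).isPrefixOf (c :: t)) = none) :
    pvGo stems (c :: t) = c :: pvGo stems t := by
  rw [pvGo, h]

theorem pvScan_nil (pats : List (List Char)) : pvScan pats [] = [] := by
  rw [pvScan]

-- find? congruence (pointwise-equal predicates)
theorem pvFindCongr {α : Type} (l : List α) (p q : α → Bool)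
    (h : ∀ a ∈ l, p a = q a) : l.find? p = l.find? q := by
  induction l with
  | nil => rfl
  | cons a l ih =>
    simp only [List.find?_cons, h a (List.mem_cons_self)]
    cases hq : q a with
    | true => rfl
    | false => exact ih (fun b hb => h b (List.mem_cons_of_mem a hb))

-- PySem.Chars.replace (fuel-based) computes pvRepl
theorem pvReplGoFuel (old new : List Char) (hold : old ≠ []) :
    ∀ (fuel : Nat) (l acc : List Char), l.length ≤ fuel →
      PySem.Chars.replace.go old new fuel l acc = acc.reverse ++ pvRepl old new l := by
  intro fuel
  induction fuel with
  | zero =>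
    intro l acc hl
    have : l = [] := List.length_eq_zero_iff.mp (Nat.le_zero.mp hl)
    subst this
    rw [PySem.Chars.replace.go, pvRepl_nil, List.append_nil]
  | succ f ih =>
    intro l acc hl
    cases l with
    | nil =>
      rw [PySem.Chars.replace.go, pvRepl_nil, List.append_nil]
      omega
    | cons c t =>
      by_cases h : old.isPrefixOf (c :: t) = true
      · rw [PySem.Chars.replace.go]
        simp only [h, if_pos]
        obtain ⟨k, hk⟩ : ∃ k, old.length = k + 1 :=
          ⟨old.length - 1, by cases old with | nil => exact absurd rfl hold | cons _ _ => simp⟩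
        have hdrop : List.drop old.length (c :: t) = t.drop (old.length - 1) := by
          rw [hk]; simp [List.drop_succ_cons]
        rw [ih (List.drop old.length (c :: t)) (new.reverse ++ acc)
              (by simp only [List.length_drop, List.length_cons] at *; omega)]
        rw [pvRepl_pos old new c t h, hdrop]
        simp
      · rw [PySem.Chars.replace.go]
        simp only [h, if_neg, Bool.false_eq_true, not_false_iff]
        rw [ih t (c :: acc) (by simp only [List.length_cons] at hl; omega)]
        rw [pvRepl_neg old new c t h]
        simp

theorem pvReplaceEq (s old new : List Char) (hold : old ≠ []) :
    PySem.Chars.replace s old new = pvRepl old new s := by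
  rw [PySem.Chars.replace]
  have : old.isEmpty = false := by cases old with | nil => exact absurd rfl hold | cons _ _ => rfl
  rw [this]
  simpa using pvReplGoFuel old new hold s.length s [] le_rfl

-- no pattern "w/" (w slash/space-free) matches anywhere inside a replacement "v / " ++ X
theorem pvNoMatchRep : ∀ (u v X : List Char),
    (∀ c ∈ u, c ≠ '/' ∧ c ≠ ' ') → (∀ c ∈ v, c ≠ '/' ∧ c ≠ ' ') →
    ¬ ((u ++ ['/']) <+: (v ++ ' ' :: '/' :: ' ' :: X)) := by
  intro u
  induction u with
  | nil =>
    intro v X _ hv h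
    cases v with
    | nil => simp [List.cons_prefix_cons] at h
    | cons b w =>
      rw [List.nil_append, List.cons_append, List.cons_prefix_cons] at h
      exact (hv b List.mem_cons_self).1 h.1.symm
  | cons a u' ih =>
    intro v X hu hv h
    cases v with
    | nil =>
      rw [List.cons_append, List.nil_append, List.cons_prefix_cons] at h
      exact (hu a List.mem_cons_self).2 h.1
    | cons b w =>
      rw [List.cons_append, List.cons_append, List.cons_prefix_cons] at h
      exact ih w X (fun c hc => hu c (List.mem_cons_of_mem a hc))
        (fun c hc => hv c (List.mem_cons_of_mem b hc)) h.2

-- a pattern "v/" cannot match ending at the '/' of a different stem u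
theorem pvNoMatchPat : ∀ (v u m : List Char),
    (∀ c ∈ v, c ≠ '/' ∧ c ≠ ' ') → (∀ c ∈ u, c ≠ '/' ∧ c ≠ ' ') → v ≠ u →
    ¬ ((v ++ ['/']) <+: (u ++ '/' :: m)) := by
  intro v
  induction v with
  | nil =>
    intro u m _ hu hne h
    cases u with
    | nil => exact hne rfl
    | cons b w =>
      rw [List.nil_append, List.cons_append, List.cons_prefix_cons] at h
      exact (hu b List.mem_cons_self).1 h.1.symm
  | cons a v' ih =>
    intro u m hv hu hne h
    cases u with
    | nil =>
      rw [List.cons_append, List.nil_append, List.cons_prefix_cons] at h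
      exact (hv a List.mem_cons_self).1 h.1
    | cons b w =>
      rw [List.cons_append, List.cons_append, List.cons_prefix_cons] at h
      obtain ⟨hab, h2⟩ := h
      exact ih w m (fun c hc => hv c (List.mem_cons_of_mem a hc))
        (fun c hc => hu c (List.mem_cons_of_mem b hc))
        (fun he => hne (by rw [hab, he])) h2

-- whether "v/" matches at the start of "u/" ++ x does not depend on x
theorem pvPrefixStable : ∀ (v u x : List Char), (∀ c ∈ v, c ≠ '/' ∧ c ≠ ' ') →
    (((v ++ ['/']) <+: ((u ++ ['/']) ++ x)) ↔ ((v ++ ['/']) <+: (u ++ ['/']))) := by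
  intro v
  induction v with
  | nil =>
    intro u x _
    cases u with
    | nil => simp [List.cons_prefix_cons]
    | cons b w => simp [List.cons_prefix_cons]
  | cons a v' ih =>
    intro u x hv
    cases u with
    | nil =>
      constructor
      · intro h
        simp only [List.cons_append, List.nil_append, List.cons_prefix_cons] at h
        exact absurd h.1 (hv a List.mem_cons_self).1
      · intro h
        simp only [List.cons_append, List.nil_append, List.cons_prefix_cons] at h
        exact absurd h.1 (hv a List.mem_cons_self).1
    | cons b w =>
      rw [List.cons_append, List.cons_append, List.cons_append, List.cons_prefix_cons,
        List.cons_prefix_cons]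
      constructor
      · rintro ⟨hab, h⟩
        exact ⟨hab, ((ih w x (fun c hc => hv c (List.mem_cons_of_mem a hc))).mp
          (by simpa using h))⟩
      · rintro ⟨hab, h⟩
        refine ⟨hab, ?_⟩
        have := (ih w x (fun c hc => hv c (List.mem_cons_of_mem a hc))).mpr h
        simpa using this

-- replacing v-occurrences never creates a new w-pattern occurrence at the front
theorem pvReplNoNew (v : List Char) (_hvne : v ≠ []) (hcv : ∀ c ∈ v, c ≠ '/' ∧ c ≠ ' ') :
    ∀ (n : Nat) (s w : List Char), s.length ≤ n → (∀ c ∈ w, c ≠ '/' ∧ c ≠ ' ') →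
    ¬ ((w ++ ['/']) <+: s) →
    ¬ ((w ++ ['/']) <+: pvRepl (v ++ ['/']) (v ++ [' ', '/', ' ']) s) := by
  intro n
  induction n with
  | zero =>
    intro s w hl _ _ h
    have : s = [] := List.length_eq_zero_iff.mp (Nat.le_zero.mp hl)
    subst this
    rw [pvRepl_nil] at h
    simp [List.prefix_nil] at h
  | succ n ih =>
    intro s w hl hw hpre
    cases s with
    | nil =>
      rw [pvRepl_nil]
      simp [List.prefix_nil]
    | cons c t =>
      by_cases hm : (v ++ ['/']).isPrefixOf (c :: t) = true
      · rw [pvRepl_pos _ _ _ _ hm]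
        have harr : (v ++ [' ', '/', ' ']) ++ pvRepl (v ++ ['/']) (v ++ [' ', '/', ' ']) (t.drop ((v ++ ['/']).length - 1))
            = v ++ ' ' :: '/' :: ' ' :: pvRepl (v ++ ['/']) (v ++ [' ', '/', ' ']) (t.drop ((v ++ ['/']).length - 1)) := by
          simp
        rw [harr]
        exact pvNoMatchRep w v _ hw hcv
      · rw [pvRepl_neg _ _ _ _ hm]
        intro h
        cases w with
        | nil =>
          rw [List.nil_append, List.cons_prefix_cons] at h
          exact hpre (by rw [List.nil_append, List.cons_prefix_cons]; exact ⟨h.1, List.nil_prefix⟩)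
        | cons a w' =>
          rw [List.cons_append, List.cons_prefix_cons] at h
          obtain ⟨hac, h2⟩ := h
          have hpre' : ¬ ((w' ++ ['/']) <+: t) := by
            intro hc
            exact hpre (by rw [List.cons_append, List.cons_prefix_cons]; exact ⟨hac, hc⟩)
          exact ih t w' (by simp only [List.length_cons] at hl; omega)
            (fun c hc => hw c (List.mem_cons_of_mem a hc)) hpre' h2

-- the scan copies a replacement "v / " verbatim
theorem pvGoRep (stems : List (List Char))
    (hst : ∀ u ∈ stems, u ≠ [] ∧ ∀ c ∈ u, c ≠ '/' ∧ c ≠ ' ') :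
    ∀ (w X : List Char), (∀ c ∈ w, c ≠ '/' ∧ c ≠ ' ') →
    pvGo stems (w ++ ' ' :: '/' :: ' ' :: X) = w ++ ' ' :: '/' :: ' ' :: pvGo stems X := by
  have hhead : ∀ (c : Char) (Y : List Char), (c = '/' ∨ c = ' ') →
      stems.find? (fun v => (v ++ ['/']).isPrefixOf (c :: Y)) = none := by
    intro c Y hc
    rw [List.find?_eq_none]
    intro u hu
    obtain ⟨hne, hcl⟩ := hst u hu
    cases u with
    | nil => exact absurd rfl hne
    | cons a u' =>
      intro hp
      rw [List.isPrefixOf_iff_prefix, List.cons_append, List.cons_prefix_cons] at hp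
      rcases hc with hc | hc
      · exact (hcl a List.mem_cons_self).1 (hp.1.trans hc)
      · exact (hcl a List.mem_cons_self).2 (hp.1.trans hc)
  intro w
  induction w with
  | nil =>
    intro X _
    rw [List.nil_append, pvGo_cons_none _ _ _ (hhead ' ' _ (Or.inr rfl)),
      pvGo_cons_none _ _ _ (hhead '/' _ (Or.inl rfl)),
      pvGo_cons_none _ _ _ (hhead ' ' _ (Or.inr rfl))]
    rfl
  | cons b w' ih =>
    intro X hw
    have hnone : stems.find? (fun v => (v ++ ['/']).isPrefixOf ((b :: w') ++ ' ' :: '/' :: ' ' :: X)) = none := by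
      rw [List.find?_eq_none]
      intro u hu
      obtain ⟨_, hcl⟩ := hst u hu
      intro hp
      rw [List.isPrefixOf_iff_prefix] at hp
      exact pvNoMatchRep u (b :: w') X hcl hw hp
    rw [List.cons_append, pvGo_cons_none _ _ _ (by simpa using hnone)]
    rw [ih X (fun c hc => hw c (List.mem_cons_of_mem b hc))]
    rfl

-- one v-replace pass walks over a foreign stem's match without touching it
theorem pvReplSkip (v u : List Char) (hcv : ∀ c ∈ v, c ≠ '/' ∧ c ≠ ' ')
    (hcu : ∀ c ∈ u, c ≠ '/' ∧ c ≠ ' ') (hvu : ¬ v <:+ u) :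
    ∀ (u'' : List Char) (m : List Char), u'' <:+ u →
    ¬ ((v ++ ['/']) <+: (u'' ++ '/' :: m)) →
    pvRepl (v ++ ['/']) (v ++ [' ', '/', ' ']) (u'' ++ '/' :: m)
      = u'' ++ '/' :: pvRepl (v ++ ['/']) (v ++ [' ', '/', ' ']) m := by
  intro u''
  induction u'' with
  | nil =>
    intro m _ h0
    rw [List.nil_append, pvRepl_neg _ _ _ _ (by
      rw [List.isPrefixOf_iff_prefix]; simpa using h0)]
    rfl
  | cons x u₃ ih =>
    intro m hsuf h0
    have hsuf3 : u₃ <:+ u := (List.suffix_cons x u₃).trans hsuf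
    rw [List.cons_append, pvRepl_neg _ _ _ _ (by
      rw [List.isPrefixOf_iff_prefix]
      intro hc
      exact h0 (by rw [List.cons_append]; exact hc))]
    have h0' : ¬ ((v ++ ['/']) <+: (u₃ ++ '/' :: m)) := by
      apply pvNoMatchPat v u₃ m hcv (fun c hc => hcu c (hsuf3.subset hc))
      intro he
      exact hvu (he ▸ hsuf3)
    rw [ih m hsuf3 h0']
    rfl

-- key lemma: one more replace pass in front of the scan = scan with the stem added in front
theorem pvKey : ∀ (n : Nat) (cs v : List Char) (rest : List (List Char)),
    cs.length ≤ n → v ≠ [] → (∀ c ∈ v, c ≠ '/' ∧ c ≠ ' ') →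
    (∀ u ∈ rest, u ≠ [] ∧ ∀ c ∈ u, c ≠ '/' ∧ c ≠ ' ') →
    (∀ u ∈ rest, ¬ v <:+ u) →
    pvGo rest (pvRepl (v ++ ['/']) (v ++ [' ', '/', ' ']) cs) = pvGo (v :: rest) cs := by
  intro n
  induction n with
  | zero =>
    intro cs v rest hl _ _ _ _
    have : cs = [] := List.length_eq_zero_iff.mp (Nat.le_zero.mp hl)
    subst this
    rw [pvRepl_nil, pvGo_nil, pvGo_nil]
  | succ n ih =>
    intro cs v rest hl hvne hcv hrest hpw
    cases cs with
    | nil => rw [pvRepl_nil, pvGo_nil, pvGo_nil]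
    | cons c t =>
      by_cases hm : (v ++ ['/']).isPrefixOf (c :: t) = true
      · rw [pvRepl_pos _ _ _ _ hm]
        have hlen : (v ++ ['/']).length - 1 = v.length := by simp
        rw [hlen]
        have harr : (v ++ [' ', '/', ' ']) ++ pvRepl (v ++ ['/']) (v ++ [' ', '/', ' ']) (t.drop v.length)
            = v ++ ' ' :: '/' :: ' ' :: pvRepl (v ++ ['/']) (v ++ [' ', '/', ' ']) (t.drop v.length) := by
          simp
        rw [harr, pvGoRep rest hrest v _ hcv]
        rw [ih (t.drop v.length) v rest
          (by simp only [List.length_drop, List.length_cons] at *; omega) hvne hcv hrest hpw]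
        rw [pvGo_cons_some (v :: rest) c t v (List.find?_cons_of_pos hm)]
      · cases hf : rest.find? (fun u => (u ++ ['/']).isPrefixOf (c :: t)) with
        | none =>
          rw [pvRepl_neg _ _ _ _ hm]
          have hnone : rest.find? (fun u => (u ++ ['/']).isPrefixOf (c :: pvRepl (v ++ ['/']) (v ++ [' ', '/', ' ']) t)) = none := by
            rw [List.find?_eq_none]
            intro u hu
            intro hp
            rw [List.isPrefixOf_iff_prefix] at hp
            have horig : ¬ ((u ++ ['/']) <+: (c :: t)) := by
              have := List.find?_eq_none.mp hf u hu
              simpa [List.isPrefixOf_iff_prefix] using this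
            have := pvReplNoNew v hvne hcv (t.length + 1) (c :: t) u
              (by simp) (hrest u hu).2 horig
            rw [pvRepl_neg _ _ _ _ hm] at this
            exact this hp
          rw [pvGo_cons_none _ _ _ hnone]
          rw [ih t v rest (by simp only [List.length_cons] at hl; omega) hvne hcv hrest hpw]
          have hmf : ((v ++ ['/']).isPrefixOf (c :: t)) = false := Bool.eq_false_iff.mpr hm
          rw [pvGo_cons_none (v :: rest) c t (by simp [hmf, hf])]
        | some u =>
          have hu : u ∈ rest := List.mem_of_find?_eq_some hf
          have hpmatch : (u ++ ['/']).isPrefixOf (c :: t) = true := by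
            have h := List.find?_some hf
            simpa using h
          have hupre : (u ++ ['/']) <+: (c :: t) := List.isPrefixOf_iff_prefix.mp hpmatch
          obtain ⟨m, hm2⟩ := hupre
          obtain ⟨hune, hcu⟩ := hrest u hu
          cases u with
          | nil => exact absurd rfl hune
          | cons a u' =>
            have hcs : c :: t = a :: (u' ++ '/' :: m) := by rw [← hm2]; simp
            rw [hcs] at hm hf ⊢
            have hlen' : m.length ≤ n := by
              have : (c :: t).length = (a :: (u' ++ '/' :: m)).length := by rw [hcs]
              simp only [List.length_cons, List.length_append] at hl this
              omega
            have h0 : ¬ ((v ++ ['/']) <+: ((a :: u') ++ '/' :: m)) := fun hx =>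
              hm (by rw [List.isPrefixOf_iff_prefix]; exact hx)
            have hrepl : pvRepl (v ++ ['/']) (v ++ [' ', '/', ' ']) (a :: (u' ++ '/' :: m))
                = a :: (u' ++ '/' :: pvRepl (v ++ ['/']) (v ++ [' ', '/', ' ']) m) := by
              have h := pvReplSkip v (a :: u') hcv hcu (hpw _ hu) (a :: u') m
                (List.suffix_refl _) h0
              exact h
            rw [hrepl]
            have hfind2 : ∀ Y : List Char,
                List.find? (fun u0 => (u0 ++ ['/']).isPrefixOf (a :: (u' ++ '/' :: Y))) rest
                  = some (a :: u') := by
              intro Y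
              have hcong : List.find? (fun u0 => (u0 ++ ['/']).isPrefixOf (a :: (u' ++ '/' :: Y))) rest
                  = List.find? (fun u0 => (u0 ++ ['/']).isPrefixOf (a :: (u' ++ '/' :: m))) rest := by
                apply pvFindCongr
                intro u0 hu0
                have hstable : ∀ Z : List Char,
                    (u0 ++ ['/']).isPrefixOf (a :: (u' ++ '/' :: Z))
                      = (u0 ++ ['/']).isPrefixOf ((a :: u') ++ ['/']) := by
                  intro Z
                  have h1 : a :: (u' ++ '/' :: Z) = ((a :: u') ++ ['/']) ++ Z := by simp
                  rw [h1]
                  cases hb : (u0 ++ ['/']).isPrefixOf ((a :: u') ++ ['/']) with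
                  | true =>
                    rw [List.isPrefixOf_iff_prefix] at hb ⊢
                    exact (pvPrefixStable u0 (a :: u') Z (hrest u0 hu0).2).mpr hb
                  | false =>
                    rw [Bool.eq_false_iff] at hb ⊢
                    intro hc
                    rw [List.isPrefixOf_iff_prefix] at hc
                    exact hb (by rw [List.isPrefixOf_iff_prefix]
                                 exact (pvPrefixStable u0 (a :: u') Z (hrest u0 hu0).2).mp hc)
                rw [hstable Y, hstable m]
              rw [hcong, hf]
            have hdrop : ∀ Y : List Char, List.drop (a :: u').length (u' ++ '/' :: Y) = Y := by
              intro Y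
              have h1 : u' ++ '/' :: Y = (u' ++ ['/']) ++ Y := by simp
              have h2 : (a :: u').length = (u' ++ ['/']).length := by simp
              rw [h1, h2, List.drop_left]
            have hvfalse : ((v ++ ['/']).isPrefixOf (a :: (u' ++ '/' :: m))) = false :=
              Bool.eq_false_iff.mpr hm
            rw [pvGo_cons_some rest a (u' ++ '/' :: pvRepl (v ++ ['/']) (v ++ [' ', '/', ' ']) m)
              (a :: u') (hfind2 _)]
            rw [pvGo_cons_some (v :: rest) a (u' ++ '/' :: m) (a :: u') (by
              rw [List.find?_cons, hvfalse]
              exact hfind2 m)]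
            rw [hdrop, hdrop]
            rw [ih m v rest hlen' hvne hcv hrest hpw]

theorem pvGoNilStems : ∀ (cs : List Char), pvGo ([] : List (List Char)) cs = cs := by
  intro cs
  induction cs with
  | nil => rw [pvGo_nil]
  | cons c t iht =>
    rw [pvGo_cons_none [] c t List.find?_nil, iht]

-- the fold of the 14 replace passes equals the single scan
theorem pvFold : ∀ (stems : List (List Char)) (cs : List Char),
    (∀ u ∈ stems, u ≠ [] ∧ ∀ c ∈ u, c ≠ '/' ∧ c ≠ ' ') →
    stems.Pairwise (fun a b => ¬ a <:+ b) →
    List.foldl pvStep cs stems = pvGo stems cs := by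
  intro stems
  induction stems with
  | nil =>
    intro cs _ _
    rw [List.foldl_nil, pvGoNilStems]
  | cons v rest ih =>
    intro cs hok hpw
    rw [List.foldl_cons]
    rw [ih (pvStep cs v) (fun u hu => hok u (List.mem_cons_of_mem v hu)) (List.Pairwise.sublist (List.sublist_cons_self v rest) hpw)]
    have hv := hok v List.mem_cons_self
    exact pvKey cs.length cs v rest le_rfl hv.1 hv.2
      (fun u hu => hok u (List.mem_cons_of_mem v hu))
      (fun u hu => List.rel_of_pairwise_cons hpw hu)

-- port B's scan over full patterns = proof-side scan over stems
theorem pvScanEqGo (stems : List (List Char)) : ∀ (n : Nat) (cs : List Char), cs.length ≤ n →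
    pvScan (stems.map (fun w => w ++ ['/'])) cs = pvGo stems cs := by
  intro n
  induction n with
  | zero =>
    intro cs hl
    have : cs = [] := List.length_eq_zero_iff.mp (Nat.le_zero.mp hl)
    subst this
    rw [pvScan_nil, pvGo_nil]
  | succ n ih =>
    intro cs hl
    cases cs with
    | nil => rw [pvScan_nil, pvGo_nil]
    | cons c t =>
      rw [pvScan]
      rw [List.find?_map]
      cases hf : stems.find? ((fun p => p.isPrefixOf (c :: t)) ∘ (fun w => w ++ ['/'])) with
      | none =>
        simp only [Option.map_none]
        rw [pvGo_cons_none _ _ _ (by simpa [Function.comp] using hf)]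
        exact congrArg (c :: ·) (ih t (by simp only [List.length_cons] at hl; omega))
      | some v =>
        simp only [Option.map_some]
        rw [pvGo_cons_some _ _ _ v (by simpa [Function.comp] using hf)]
        have h1 : (v ++ ['/']).dropLast = v := List.dropLast_concat
        have h2 : (v ++ ['/']).length - 1 = v.length := by simp
        rw [h1, h2]
        rw [ih (t.drop v.length) (by simp only [List.length_drop, List.length_cons] at hl ⊢; omega)]

-- A's chain of Str.replace calls, moved to the character level
theorem pvACchars (s : String) :
    (split_imperial_metric_py s).toList = List.foldl pvStep s.toList pvStems := by
  simp only [split_imperial_metric_py, pvStems, pvStep, List.foldl_cons, List.foldl_nil,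
    PySem.Str.toList_replace]
  simp [pvReplaceEq]

theorem pvBchars (s : String) :
    (split_imperial_metric_py_alt s).toList = pvScan pvPats s.toList := by
  simp [split_imperial_metric_py_alt]

theorem pvStemsOk : ∀ u ∈ pvStems, u ≠ [] ∧ ∀ c ∈ u, c ≠ '/' ∧ c ≠ ' ' := by
  have hbool : pvStems.all (fun u => (!u.isEmpty) && u.all (fun c => c != '/' && c != ' ')) = true := by
    decide
  simp only [List.all_eq_true, Bool.and_eq_true, Bool.not_eq_true', bne_iff_ne, ne_eq] at hbool
  intro u hu
  obtain ⟨h1, h2⟩ := hbool u hu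
  refine ⟨?_, fun c hc => h2 c hc⟩
  intro he
  subst he
  simp at h1

-- ===== VERDICT (by name: the statement is the Claim_ definition above) =====
theorem split_imperial_metric_py_spec : Claim_equal_split_imperial_metric_py := by
  intro s _
  show split_imperial_metric_py s = split_imperial_metric_py_alt s
  apply String.toList_inj.mp
  rw [pvACchars, pvBchars]
  have hpats : pvPats = pvStems.map (fun w => w ++ ['/']) := by simp [pvPats, pvStems]
  rw [hpats, pvScanEqGo pvStems s.toList.length s.toList le_rfl]
  exact pvFold pvStems s.toList pvStemsOk (by decide)
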